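-- pv_equiv track=rewrite | github.com/tarunganesh2004/GFG | 2025/June/10th_june.py | countStringsBrute
-- ===== SOURCE A (Python) =====
-- def countStringsBrute(s): # O(n^2) time complexity
--     set1=set()
--     set1.add(s)
--     n=len(s)
--     for i in range(n):
--         for j in range(i+1,n):
--             if s[i] != s[j]:
--                 swapped = list(s)
--                 swapped[i], swapped[j] = swapped[j], swapped[i]
--                 k=''.join(swapped)
--                 if k not in set1:
--                     set1.add(k)
--     return len(set1)
-- ===== SOURCE B (Python) =====
-- def countStringsBrute(s):
--     # One O(n) pass: the original string plus one distinct result per index pair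
--     # holding different characters; count those pairs with running char counts.
--     seen = {}
--     diff = 0
--     for i, ch in enumerate(s):
--         diff += i - seen.get(ch, 0)
--         seen[ch] = seen.get(ch, 0) + 1
--     return 1 + diff
-- ===== Notes on version B (the rewrite author's own statement) =====
-- stated objective: faster
-- what changed: Replaces the quadratic enumeration of all index pairs with string materialisation and set membership by a single pass with running character counts, using the fact that each index pair of differing characters yields a distinct swapped string, so the answer is 1 plus the number of such pairs.
import Mathlib
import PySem

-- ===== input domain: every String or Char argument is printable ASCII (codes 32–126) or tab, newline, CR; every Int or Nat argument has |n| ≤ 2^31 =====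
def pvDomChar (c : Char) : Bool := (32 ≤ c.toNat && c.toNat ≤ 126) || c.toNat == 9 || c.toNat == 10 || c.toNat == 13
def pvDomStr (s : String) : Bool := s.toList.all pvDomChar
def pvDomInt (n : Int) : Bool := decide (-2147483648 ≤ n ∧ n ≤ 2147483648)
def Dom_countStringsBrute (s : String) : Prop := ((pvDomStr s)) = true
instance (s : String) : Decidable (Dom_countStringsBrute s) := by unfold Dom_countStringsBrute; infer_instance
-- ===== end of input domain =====

-- B replaces the quadratic pair/set enumeration by a single counting pass:
-- each index pair with differing characters yields a distinct swapped string.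

-- ===== PORT A =====
def countStringsBrute (s : String) : Int :=
  let set1 : PySem.Set String := PySem.Set.add PySem.Set.empty s
  let n : Int := PySem.Str.len s
  let set1 := (PySem.List.pyRange 0 n 1).foldl (fun st i =>
    (PySem.List.pyRange (i + 1) n 1).foldl (fun st j =>
      if PySem.List.pyGetD s.toList i ' ' ≠ PySem.List.pyGetD s.toList j ' ' then
        -- swapped = list(s); swapped[i], swapped[j] = swapped[j], swapped[i]
        let swapped := PySem.List.pySetD (PySem.List.pySetD s.toList i
            (PySem.List.pyGetD s.toList j ' ')) j (PySem.List.pyGetD s.toList i ' ')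
        let k := String.ofList swapped  -- ''.join(swapped)
        if ¬ PySem.Set.contains st k then PySem.Set.add st k else st
      else st) st) set1
  PySem.Set.len set1

-- ===== PORT B =====
def countStringsBrute_alt (s : String) : Int :=
  let st := (PySem.List.enumerate s.toList 0).foldl
    (fun (p : PySem.Dict Char Int × Int) ic =>
      (p.1.insert ic.2 (p.1.getD ic.2 0 + 1), p.2 + (ic.1 - p.1.getD ic.2 0)))
    (PySem.Dict.empty, 0)
  1 + st.2

-- ===== PRECONDITION & SPEC =====
def Spec_countStringsBrute (s : String) (out : Int) : Prop := out = countStringsBrute_alt s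
instance (s : String) (out : Int) : Decidable (Spec_countStringsBrute s out) := by unfold Spec_countStringsBrute; infer_instance

-- ===== CLAIM (what is proved, stated in full; the proofs are below) =====
def Claim_equal_countStringsBrute : Prop := ∀ (s : String), Dom_countStringsBrute s → Spec_countStringsBrute s (countStringsBrute s)

-- ===== LEMMAS AND PROOFS =====

-- number of index pairs i < j with cs[i] ≠ cs[j]
def pvDiff : List Char → Nat
  | [] => 0
  | c :: t => t.countP (fun x => decide (c ≠ x)) + pvDiff t

-- the string A builds for the pair p = (i, j)
def pvSw (cs : List Char) (p : Int × Int) : String :=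
  String.ofList (PySem.List.pySetD (PySem.List.pySetD cs p.1
    (PySem.List.pyGetD cs p.2 ' ')) p.2 (PySem.List.pyGetD cs p.1 ' '))

def pvPairs (n : Int) : List (Int × Int) :=
  (PySem.List.pyRange 0 n 1).flatMap (fun i => (PySem.List.pyRange (i + 1) n 1).map (fun j => (i, j)))

lemma pv_foldl_flatMap {α β σ : Type} (xs : List α) (f : α → List β) (g : σ → β → σ) (init : σ) :
    xs.foldl (fun st i => (f i).foldl g st) init = (xs.flatMap f).foldl g init := by
  induction xs generalizing init with
  | nil => rfl
  | cons x xs ih => simp [List.foldl_append, ih]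

lemma pv_fold_fresh {β : Type} (h : β → String) (q : β → Prop) [DecidablePred q] :
    ∀ (L : List β) (st : List String),
      ((L.filter (fun p => decide (q p))).map h).Nodup →
      (∀ p ∈ L, q p → h p ∉ st) →
      L.foldl (fun st p => if q p then
          (if ¬ PySem.Set.contains st (h p) then PySem.Set.add st (h p) else st) else st) st
        = st ++ (L.filter (fun p => decide (q p))).map h := by
  intro L
  induction L with
  | nil => intro st _ _; simp
  | cons x L ih =>
    intro st hnd hfresh
    by_cases hq : q x
    · have hx : h x ∉ st := hfresh x (by simp) hq
      have hnd' : (h x :: (L.filter (fun p => decide (q p))).map h).Nodup := by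
        simpa [List.filter_cons, hq] using hnd
      have hcont : ¬ PySem.Set.contains st (h x) = true := by
        rw [PySem.Set.contains_iff]; exact hx
      rw [List.foldl_cons, if_pos hq, if_pos hcont, PySem.Set.add_of_not_mem hx,
        ih (st ++ [h x]) hnd'.of_cons ?_]
      · simp [List.filter_cons, hq]
      · intro p hp hqp
        simp only [List.mem_append, List.mem_singleton, not_or]
        refine ⟨hfresh p (by simp [hp]) hqp, ?_⟩
        intro hcontra
        have : h p ∈ (L.filter (fun p => decide (q p))).map h :=
          List.mem_map_of_mem (by simp [List.mem_filter, hp, hqp])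
        rw [hcontra] at this
        exact (List.nodup_cons.mp hnd').1 this
    · rw [List.foldl_cons, if_neg hq, ih st (by simpa [List.filter_cons, hq] using hnd)
        (fun p hp hqp => hfresh p (by simp [hp]) hqp)]
      simp [List.filter_cons, hq]

lemma pv_mem_pairs (n : Int) (p : Int × Int) :
    p ∈ pvPairs n ↔ 0 ≤ p.1 ∧ p.1 + 1 ≤ p.2 ∧ p.2 < n := by
  obtain ⟨a, b⟩ := p
  simp only [pvPairs, List.mem_flatMap, List.mem_map, PySem.List.mem_pyRange_one, Prod.mk.injEq]
  constructor
  · rintro ⟨i, ⟨hi0, hin⟩, j, ⟨hj, hjn⟩, rfl, rfl⟩; omega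
  · rintro ⟨h0, h1, h2⟩; exact ⟨a, ⟨h0, by omega⟩, b, ⟨h1, h2⟩, rfl, rfl⟩

lemma pv_nodup_pairs (n : Int) : (pvPairs n).Nodup := by
  unfold pvPairs
  rw [List.nodup_flatMap]
  constructor
  · intro i _
    exact (PySem.List.nodup_pyRange_one (i + 1) n).map
      (fun j j' hjj => by simpa using congrArg Prod.snd hjj)
  · refine (PySem.List.pairwise_lt_pyRange_one 0 n).imp ?_
    intro i i' hlt z hz hz'
    simp only [List.mem_map] at hz hz'
    obtain ⟨j, _, rfl⟩ := hz
    obtain ⟨j', _, h⟩ := hz'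
    have := congrArg Prod.fst h
    simp at this
    omega

lemma pv_getD_int (cs : List Char) (i : Int) (h : 0 ≤ i) :
    PySem.List.pyGetD cs i ' ' = cs.getD i.toNat ' ' := by
  conv_lhs => rw [← Int.toNat_of_nonneg h]
  rw [PySem.List.pyGetD_natCast]

-- evaluation of the swapped list at an index
lemma pv_W_getElem (cs : List Char) (a b p : Nat) (v w : Char) (hab : a < b) (hb : b < cs.length)
    (hp : p < cs.length) :
    ((cs.set a v).set b w).getD p ' '
      = if p = b then w else if p = a then v else cs.getD p ' ' := by
  rw [List.getD_eq_getElem _ _ (by simpa using hp)]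
  rw [List.getElem_set, List.getElem_set]
  split_ifs with h1 h2 h3 <;> first
    | rfl
    | omega
    | (rw [List.getD_eq_getElem _ _ (by omega)])
    | (exact absurd h1.symm h2)
    | (rw [List.getD_eq_getElem _ _ (by omega)]; exact congrArg _ h3.symm)

lemma pv_sw_eq (cs : List Char) (p : Int × Int) (h0 : 0 ≤ p.1) (h1 : p.1 + 1 ≤ p.2)
    (h2 : p.2 < (cs.length : Int)) :
    pvSw cs p = String.ofList ((cs.set p.1.toNat (cs.getD p.2.toNat ' ')).set p.2.toNat (cs.getD p.1.toNat ' ')) := by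
  obtain ⟨a, b⟩ := p
  simp only [pvSw]
  rw [pv_getD_int cs a h0, pv_getD_int cs b (by omega),
    PySem.List.pySetD_of_nonneg _ _ h0, PySem.List.pySetD_of_nonneg _ _ (by omega : (0:Int) ≤ b)]

lemma pv_toNat_facts (cs : List Char) (p : Int × Int) (h0 : 0 ≤ p.1) (h1 : p.1 + 1 ≤ p.2)
    (h2 : p.2 < (cs.length : Int)) : p.1.toNat < p.2.toNat ∧ p.2.toNat < cs.length := by omega

lemma pv_sw_ne (cs : List Char) (p : Int × Int) (h0 : 0 ≤ p.1) (h1 : p.1 + 1 ≤ p.2)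
    (h2 : p.2 < (cs.length : Int))
    (hne : PySem.List.pyGetD cs p.1 ' ' ≠ PySem.List.pyGetD cs p.2 ' ') :
    pvSw cs p ≠ String.ofList cs := by
  obtain ⟨hab, hb⟩ := pv_toNat_facts cs p h0 h1 h2
  rw [pv_sw_eq cs p h0 h1 h2]
  intro hcontra
  have hl : (cs.set p.1.toNat (cs.getD p.2.toNat ' ')).set p.2.toNat (cs.getD p.1.toNat ' ') = cs := by
    simpa using congrArg String.toList hcontra
  have this : ((cs.set p.1.toNat (cs.getD p.2.toNat ' ')).set p.2.toNat (cs.getD p.1.toNat ' ')).getD p.1.toNat ' '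
      = cs.getD p.1.toNat ' ' := by rw [hl]
  rw [pv_W_getElem cs _ _ _ _ _ hab hb (lt_trans hab hb)] at this
  simp only [if_neg (by omega : ¬ p.1.toNat = p.2.toNat), if_pos rfl] at this
  rw [pv_getD_int cs p.1 h0, pv_getD_int cs p.2 (by omega)] at hne
  exact hne (this.symm)

lemma pv_sw_inj (cs : List Char) (p p' : Int × Int)
    (hp : 0 ≤ p.1 ∧ p.1 + 1 ≤ p.2 ∧ p.2 < (cs.length : Int))
    (hp' : 0 ≤ p'.1 ∧ p'.1 + 1 ≤ p'.2 ∧ p'.2 < (cs.length : Int))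
    (hd : PySem.List.pyGetD cs p.1 ' ' ≠ PySem.List.pyGetD cs p.2 ' ')
    (hd' : PySem.List.pyGetD cs p'.1 ' ' ≠ PySem.List.pyGetD cs p'.2 ' ')
    (heq : pvSw cs p = pvSw cs p') : p = p' := by
  obtain ⟨h0, h1, h2⟩ := hp
  obtain ⟨h0', h1', h2'⟩ := hp'
  obtain ⟨hab, hb⟩ := pv_toNat_facts cs p h0 h1 h2
  obtain ⟨hab', hb'⟩ := pv_toNat_facts cs p' h0' h1' h2'
  rw [pv_getD_int cs p.1 h0, pv_getD_int cs p.2 (by omega)] at hd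
  rw [pv_getD_int cs p'.1 h0', pv_getD_int cs p'.2 (by omega)] at hd'
  rw [pv_sw_eq cs p h0 h1 h2, pv_sw_eq cs p' h0' h1' h2'] at heq
  have hleq : (cs.set p.1.toNat (cs.getD p.2.toNat ' ')).set p.2.toNat (cs.getD p.1.toNat ' ')
      = (cs.set p'.1.toNat (cs.getD p'.2.toNat ' ')).set p'.2.toNat (cs.getD p'.1.toNat ' ') := by
    simpa using congrArg String.toList heq
  have key : ∀ r : Nat, r < cs.length →
      ((r = p.1.toNat ∨ r = p.2.toNat) ↔ (r = p'.1.toNat ∨ r = p'.2.toNat)) := by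
    intro r hr
    have h : ((cs.set p.1.toNat (cs.getD p.2.toNat ' ')).set p.2.toNat (cs.getD p.1.toNat ' ')).getD r ' '
        = ((cs.set p'.1.toNat (cs.getD p'.2.toNat ' ')).set p'.2.toNat (cs.getD p'.1.toNat ' ')).getD r ' ' := by rw [hleq]
    rw [pv_W_getElem cs _ _ _ _ _ hab hb hr, pv_W_getElem cs _ _ _ _ _ hab' hb' hr] at h
    constructor
    · rintro (rfl | rfl)
      · by_contra hcon
        push Not at hcon
        rw [if_neg (by omega), if_pos rfl, if_neg hcon.2, if_neg hcon.1] at h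
        exact hd h.symm
      · by_contra hcon
        push Not at hcon
        rw [if_pos rfl, if_neg hcon.2, if_neg hcon.1] at h
        exact hd h
    · rintro (rfl | rfl)
      · by_contra hcon
        push Not at hcon
        rw [if_neg hcon.2, if_neg hcon.1, if_neg (by omega), if_pos rfl] at h
        exact hd' h
      · by_contra hcon
        push Not at hcon
        rw [if_neg hcon.2, if_neg hcon.1, if_pos rfl] at h
        exact hd' h.symm
  have k1 := key p.1.toNat (lt_trans hab hb)
  have k2 := key p.2.toNat hb
  have k3 := key p'.1.toNat (lt_trans hab' hb')
  have k4 := key p'.2.toNat hb'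
  simp only [true_or, or_true, iff_true, true_iff] at k1 k2 k3 k4
  have e1 : p.1 = p'.1 ∧ p.2 = p'.2 := by omega
  exact Prod.ext e1.1 e1.2

-- counting: the filtered pair list counts pvDiff
lemma pv_sum (cs : List Char) :
    ((List.range cs.length).map
      (fun k => (cs.drop (k+1)).countP (fun x => decide (cs.getD k ' ' ≠ x)))).sum = pvDiff cs := by
  induction cs with
  | nil => simp [pvDiff]
  | cons c t ih =>
    rw [show (c :: t).length = t.length + 1 from rfl, List.range_succ_eq_map]
    simp only [List.map_cons, List.map_map, List.sum_cons]
    have : ((List.range t.length).map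
        ((fun k => ((c :: t).drop (k+1)).countP (fun x => decide ((c :: t).getD k ' ' ≠ x))) ∘ Nat.succ))
        = (List.range t.length).map (fun k => (t.drop (k+1)).countP (fun x => decide (t.getD k ' ' ≠ x))) := by
      refine List.map_congr_left ?_
      intro k _
      rfl
    rw [this, ih]
    simp [pvDiff]

lemma pv_count (cs : List Char) :
    (((pvPairs ((cs.length : Int))).filter
      (fun p => decide (PySem.List.pyGetD cs p.1 ' ' ≠ PySem.List.pyGetD cs p.2 ' '))).length)
      = pvDiff cs := by
  unfold pvPairs
  rw [List.filter_flatMap]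
  rw [List.length_flatMap]
  rw [PySem.List.pyRange_zero_natCast cs.length, List.map_map]
  rw [← pv_sum cs]
  refine congrArg List.sum (List.map_congr_left ?_)
  intro k hk
  simp only [List.mem_range] at hk
  simp only [Function.comp_def]
  rw [List.filter_map, List.length_map, List.countP_eq_length_filter]
  have hmap : (PySem.List.pyRange ((k:Nat) + 1 : Int) ((cs.length : Int)) 1).map (fun j => PySem.List.pyGetD cs j ' ')
      = cs.drop ((k:Nat) + 1 : Int).toNat := PySem.List.map_pyGetD_pyRange' cs ' ' (by omega)
  have : ((PySem.List.pyRange ((k:Nat) + 1 : Int) ((cs.length : Int)) 1).countP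
      (fun j => decide (PySem.List.pyGetD cs ((k:Nat) : Int) ' ' ≠ PySem.List.pyGetD cs j ' ')))
      = ((PySem.List.pyRange ((k:Nat) + 1 : Int) ((cs.length : Int)) 1).map (fun j => PySem.List.pyGetD cs j ' ')).countP
        (fun x => decide (PySem.List.pyGetD cs ((k:Nat) : Int) ' ' ≠ x)) := by
    rw [List.countP_map]; rfl
  simp only [Function.comp_def]
  rw [← List.countP_eq_length_filter, this, hmap]
  have hk1 : (((k:Nat) + 1 : Int)).toNat = k + 1 := by omega
  rw [hk1, pv_getD_int cs (k : Int) (by omega)]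
  simp [List.countP_eq_length_filter]

-- turn the nested fold into a fold over the pair list
lemma pv_nested (n : Int) (g : List String → (Int × Int) → List String) (init : List String) :
    (PySem.List.pyRange 0 n 1).foldl (fun st i =>
      (PySem.List.pyRange (i + 1) n 1).foldl (fun st j => g st (i, j)) st) init
    = (pvPairs n).foldl g init := by
  unfold pvPairs
  rw [← pv_foldl_flatMap]
  have : (fun (st : List String) i => ((PySem.List.pyRange (i + 1) n 1).map (fun j => (i, j))).foldl g st)
      = (fun (st : List String) i => (PySem.List.pyRange (i + 1) n 1).foldl (fun st j => g st (i, j)) st) := by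
    funext st i
    rw [List.foldl_map]
  rw [this]

-- A's value: 1 + number of differing pairs
lemma pv_A_eq (s : String) : countStringsBrute s = 1 + (pvDiff s.toList : Int) := by
  have hG := pv_nested ((s.toList.length : Int))
    (fun st p => if PySem.List.pyGetD s.toList p.1 ' ' ≠ PySem.List.pyGetD s.toList p.2 ' ' then
      (if ¬ PySem.Set.contains st (pvSw s.toList p) then PySem.Set.add st (pvSw s.toList p) else st) else st)
    (PySem.Set.add PySem.Set.empty s)
  have hnd : (((pvPairs ((s.toList.length : Int))).filter
      (fun p => decide (PySem.List.pyGetD s.toList p.1 ' ' ≠ PySem.List.pyGetD s.toList p.2 ' '))).map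
        (pvSw s.toList)).Nodup := by
    refine List.Nodup.map_on ?_ ((pv_nodup_pairs _).filter _)
    intro p hp p' hp' hpp
    simp only [List.mem_filter, decide_eq_true_eq] at hp hp'
    exact pv_sw_inj s.toList p p' ((pv_mem_pairs _ p).mp hp.1) ((pv_mem_pairs _ p').mp hp'.1)
      hp.2 hp'.2 hpp
  have hfresh : ∀ p ∈ pvPairs ((s.toList.length : Int)),
      (PySem.List.pyGetD s.toList p.1 ' ' ≠ PySem.List.pyGetD s.toList p.2 ' ') →
      pvSw s.toList p ∉ [s] := by
    intro p hp hq
    obtain ⟨h0, h1, h2⟩ := (pv_mem_pairs _ p).mp hp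
    simp only [List.mem_singleton]
    intro hcontra
    exact pv_sw_ne s.toList p h0 h1 h2 hq (by rw [hcontra]; exact (String.ofList_toList (s := s)).symm)
  have h3 := pv_fold_fresh (pvSw s.toList)
    (fun p => PySem.List.pyGetD s.toList p.1 ' ' ≠ PySem.List.pyGetD s.toList p.2 ' ')
    (pvPairs ((s.toList.length : Int))) [s] hnd hfresh
  have hinit : PySem.Set.add PySem.Set.empty s = [s] :=
    PySem.Set.add_of_not_mem (List.not_mem_nil)
  refine Eq.trans (congrArg PySem.Set.len hG) ?_
  rw [hinit]
  refine Eq.trans (congrArg PySem.Set.len h3) ?_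
  simp only [PySem.Set.len, List.length_append, List.length_cons,
    List.length_nil, List.length_map]
  rw [pv_count s.toList]
  push_cast
  ring

-- B-side: count of non-c elements
lemma pv_countP_ne (l : List Char) (c : Char) :
    l.countP (fun x => decide (x ≠ c)) + l.count c = l.length := by
  induction l with
  | nil => rfl
  | cons a t ih =>
    simp only [List.countP_cons, List.count_cons, List.length_cons]
    by_cases h : a = c
    · subst h
      rw [if_neg (by simp), if_pos (by simp)]
      omega
    · rw [if_pos (by simp [h]), if_neg (by simp [h])]
      omega

lemma pv_diff_snoc (l : List Char) (c : Char) :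
    pvDiff (l ++ [c]) = pvDiff l + l.countP (fun x => decide (x ≠ c)) := by
  induction l with
  | nil => simp [pvDiff]
  | cons a t ih =>
    simp only [List.cons_append, pvDiff, ih, List.countP_append, List.countP_cons]
    have : (decide (a ≠ c)) = (decide (c ≠ a)) := by
      by_cases h : a = c
      · subst h; rfl
      · have h' : c ≠ a := fun e => h e.symm
        simp [h, h']
    simp [this]
    ring

lemma pv_B_inv (cs : List Char) : ∀ (pre : List Char) (d : PySem.Dict Char Int) (a : Int),
    (∀ c, d.getD c 0 = (pre.count c : Int)) →
    ((PySem.List.enumerate cs ((pre.length : Int))).foldl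
      (fun (p : PySem.Dict Char Int × Int) ic =>
        (p.1.insert ic.2 (p.1.getD ic.2 0 + 1), p.2 + (ic.1 - p.1.getD ic.2 0)))
      (d, a)).2
    = a + ((pvDiff (pre ++ cs) : Int) - (pvDiff pre : Int)) := by
  induction cs with
  | nil => intro pre d a _; simp
  | cons x t ih =>
    intro pre d a hd
    rw [PySem.List.enumerate_cons, List.foldl_cons]
    have hlen : ((pre.length : Int)) + 1 = (((pre ++ [x]).length : Int)) := by simp
    rw [hlen, ih (pre ++ [x]) _ _ ?_]
    · rw [hd x, pv_diff_snoc pre x]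
      have := pv_countP_ne pre x
      push_cast
      push_cast at this
      rw [List.append_assoc]
      simp only [List.singleton_append]
      omega
    · intro c
      rw [PySem.Dict.getD_insert, hd x, hd c, List.count_append]
      by_cases h : c = x
      · subst h; simp
      · have h' : ¬x = c := fun e => h e.symm
        simp [h, h']

-- B's value: 1 + number of differing pairs
lemma pv_B_eq (s : String) : countStringsBrute_alt s = 1 + (pvDiff s.toList : Int) := by
  have := pv_B_inv s.toList [] PySem.Dict.empty 0 (by intro c; simp)
  simp only [List.length_nil, Int.natCast_zero, List.nil_append] at this
  show 1 + ((PySem.List.enumerate s.toList 0).foldl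
    (fun (p : PySem.Dict Char Int × Int) ic =>
      (p.1.insert ic.2 (p.1.getD ic.2 0 + 1), p.2 + (ic.1 - p.1.getD ic.2 0)))
    (PySem.Dict.empty, 0)).2 = 1 + (pvDiff s.toList : Int)
  rw [this]
  simp [pvDiff]

-- ===== VERDICT (by name: the statement is the Claim_ definition above) =====
theorem countStringsBrute_spec : Claim_equal_countStringsBrute := by
  intro s _
  unfold Spec_countStringsBrute
  rw [pv_A_eq, pv_B_eq]
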